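-- pv_equiv track=rewrite | github.com/Beluki/MovieWar | Source/MovieWar.py | find_local_movie
-- ===== SOURCE A (Python) =====
-- def find_local_movie(movies, name):
--     """
--     Find a movie by it's name in the local database.
--
--     Returns (match, suggestions):
--         - match is the corresponding movie when there is an exact match by name, or None.
--         - suggestions is a set of additional movie titles that contain the name.
--     """
--     match = None
--     suggestions = set()
--
--     for movie in movies:
--         # at least a suggestion?
--         if name.lower() in movie['name'].lower():
--             suggestions.add(movie['name'])
--
--             # also an exact match?
--             if name.lower() == movie['name'].lower():
--                 match = movie
--
--     return match, suggestions
-- ===== SOURCE B (Python) =====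
-- def find_local_movie(movies, name):
--     target = name.lower()
--     suggestions = {m['name'] for m in movies if target in m['name'].lower()}
--     table = {m['name'].lower(): m for m in movies}
--     return table.get(target), suggestions
-- ===== Notes on version B (the rewrite author's own statement) =====
-- stated objective: simpler
-- what changed: Replaces A's single combined loop with mutable match/suggestions state by a set comprehension for suggestions plus a separately built last-wins lowercase-name lookup table queried once.
import Mathlib
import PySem

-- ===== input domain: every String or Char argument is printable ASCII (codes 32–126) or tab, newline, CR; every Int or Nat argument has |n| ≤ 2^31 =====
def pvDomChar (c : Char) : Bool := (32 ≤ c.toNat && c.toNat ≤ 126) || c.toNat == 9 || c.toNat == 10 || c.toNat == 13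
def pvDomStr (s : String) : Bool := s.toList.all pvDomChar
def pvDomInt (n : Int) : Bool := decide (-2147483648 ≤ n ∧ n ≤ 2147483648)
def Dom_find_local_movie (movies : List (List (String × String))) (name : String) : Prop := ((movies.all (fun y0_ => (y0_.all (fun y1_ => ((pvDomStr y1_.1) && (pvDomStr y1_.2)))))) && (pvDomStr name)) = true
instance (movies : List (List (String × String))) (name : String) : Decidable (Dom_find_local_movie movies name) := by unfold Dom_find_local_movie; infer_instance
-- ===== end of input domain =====

-- B replaces A's single combined loop by a suggestions set comprehension plus a
-- last-wins lookup table (objective: simpler/idiomatic decomposition).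
-- ===== PORT A =====
-- movie['name'] (raises KeyError if absent — excluded by Pre_; getD "" is only read under Pre_)
def pvName (m : List (String × String)) : String := (PySem.Dict.mk m).getD "name" ""

def find_local_movie (movies : List (List (String × String))) (name : String) : (Option (List (String × String))) × List String :=
  movies.foldl
    (fun (st : Option (List (String × String)) × PySem.Set String) movie =>
      if PySem.Str.isIn (PySem.Str.lower name) (PySem.Str.lower (pvName movie)) then
        let sugg := PySem.Set.add st.2 (pvName movie)
        if PySem.Str.lower name == PySem.Str.lower (pvName movie) then (some movie, sugg)
        else (st.1, sugg)
      else st)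
    (none, PySem.Set.empty)

-- ===== PORT B =====
def find_local_movie_alt (movies : List (List (String × String))) (name : String) : (Option (List (String × String))) × List String :=
  let target := PySem.Str.lower name
  let suggestions : PySem.Set String :=
    PySem.Set.ofList
      ((movies.filter (fun m => PySem.Str.isIn target (PySem.Str.lower (pvName m)))).map pvName)
  let table : PySem.Dict String (List (String × String)) :=
    movies.foldl (fun d m => d.insert (PySem.Str.lower (pvName m)) m) PySem.Dict.empty
  (table.get? target, suggestions)

-- ===== PRECONDITION & SPEC =====
-- Pre_ excludes movies lacking a 'name' key, on which Python A (and B) raise KeyError.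
def Pre_find_local_movie (movies : List (List (String × String))) (name : String) : Prop :=
  ∀ m ∈ movies, ∃ p ∈ m, p.1 = "name"
instance (movies : List (List (String × String))) (name : String) : Decidable (Pre_find_local_movie movies name) := by unfold Pre_find_local_movie; infer_instance
def pvWitness_find_local_movie : (List (List (String × String))) × String :=
  ([[("name", "Alien"), ("year", "1979")], [("name", "Aliens")]], "alien")

def Spec_find_local_movie (movies : List (List (String × String))) (name : String) (out : (Option (List (String × String))) × List String) : Prop := out = find_local_movie_alt movies name
instance (movies : List (List (String × String))) (name : String) (out : (Option (List (String × String))) × List String) : Decidable (Spec_find_local_movie movies name out) := by unfold Spec_find_local_movie; infer_instance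

-- ===== CLAIM (what is proved, stated in full; the proofs are below) =====
def Claim_equal_find_local_movie : Prop := ∀ (movies : List (List (String × String))) (name : String), Dom_find_local_movie movies name → Pre_find_local_movie movies name → Spec_find_local_movie movies name (find_local_movie movies name)

-- ===== LEMMAS AND PROOFS =====

-- A string is a substring of itself, so equal lowered strings always pass A's 'in' test.
theorem pv_isIn_self (s : String) : PySem.Str.isIn s s = true := by
  simp [PySem.Str.isIn, PySem.Chars.isIn_iff_infix]

-- match accumulator: A's fold's first component equals the lookup in B's table
theorem pv_fst_eq (name : String) (movies : List (List (String × String)))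
    (d : PySem.Dict String (List (String × String))) (s0 : PySem.Set String) :
    (movies.foldl
      (fun (st : Option (List (String × String)) × PySem.Set String) movie =>
        if PySem.Str.isIn (PySem.Str.lower name) (PySem.Str.lower (pvName movie)) then
          let sugg := PySem.Set.add st.2 (pvName movie)
          if PySem.Str.lower name == PySem.Str.lower (pvName movie) then (some movie, sugg)
          else (st.1, sugg)
        else st)
      (d.get? (PySem.Str.lower name), s0)).1
    = (movies.foldl (fun d m => d.insert (PySem.Str.lower (pvName m)) m) d).get?
        (PySem.Str.lower name) := by
  induction movies generalizing d s0 with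
  | nil => simp
  | cons m rest ih =>
    simp only [List.foldl_cons]
    by_cases he : PySem.Str.lower name = PySem.Str.lower (pvName m)
    · have h1 : PySem.Str.isIn (PySem.Str.lower name) (PySem.Str.lower (pvName m)) = true := by
        rw [← he]; exact pv_isIn_self _
      rw [h1]
      simp only [he, beq_self_eq_true, if_true]
      rw [← PySem.Dict.get?_insert_self (d := d) (k := PySem.Str.lower (pvName m)) (v := m), ← he]
      exact ih _ _
    · have h2 : d.get? (PySem.Str.lower name)
          = (d.insert (PySem.Str.lower (pvName m)) m).get? (PySem.Str.lower name) := by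
        exact (PySem.Dict.get?_insert_of_ne _ _ he).symm
      by_cases hin : PySem.Str.isIn (PySem.Str.lower name) (PySem.Str.lower (pvName m)) = true
      · rw [hin]
        have hb : (PySem.Str.lower name == PySem.Str.lower (pvName m)) = false := by
          simp [he]
        simp only [hb]
        rw [h2]; exact ih _ _
      · rw [Bool.not_eq_true] at hin
        rw [hin]
        simp only [Bool.false_eq_true, if_false]
        rw [h2]; exact ih _ _

-- suggestions accumulator: A's fold's second component equals folding Set.add over B's filtered names
theorem pv_snd_eq (name : String) (movies : List (List (String × String)))
    (m0 : Option (List (String × String))) (s0 : PySem.Set String) :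
    (movies.foldl
      (fun (st : Option (List (String × String)) × PySem.Set String) movie =>
        if PySem.Str.isIn (PySem.Str.lower name) (PySem.Str.lower (pvName movie)) then
          let sugg := PySem.Set.add st.2 (pvName movie)
          if PySem.Str.lower name == PySem.Str.lower (pvName movie) then (some movie, sugg)
          else (st.1, sugg)
        else st)
      (m0, s0)).2
    = ((movies.filter (fun m => PySem.Str.isIn (PySem.Str.lower name) (PySem.Str.lower (pvName m)))).map pvName).foldl PySem.Set.add s0 := by
  induction movies generalizing m0 s0 with
  | nil => simp
  | cons m rest ih =>
    simp only [List.foldl_cons, List.filter_cons]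
    by_cases hin : PySem.Str.isIn (PySem.Str.lower name) (PySem.Str.lower (pvName m)) = true
    · rw [hin]; simp only [if_true]
      by_cases he : (PySem.Str.lower name == PySem.Str.lower (pvName m)) = true
      · simp only [he, if_true]; exact ih _ _
      · rw [Bool.not_eq_true] at he
        simp only [he, Bool.false_eq_true, if_false]
        exact ih _ _
    · rw [Bool.not_eq_true] at hin
      rw [hin]
      simp only [Bool.false_eq_true, if_false]
      exact ih _ _

-- ===== VERDICT (by name: the statement is the Claim_ definition above) =====
theorem find_local_movie_spec : Claim_equal_find_local_movie := by
  intro movies name _ _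
  unfold Spec_find_local_movie find_local_movie find_local_movie_alt
  have hf := pv_fst_eq name movies PySem.Dict.empty PySem.Set.empty
  have hs := pv_snd_eq name movies none PySem.Set.empty
  simp only [PySem.Dict.get?_empty] at hf
  refine Prod.ext ?_ ?_
  · exact hf
  · rw [hs]
    simp only [PySem.Set.ofList_eq_foldl]
    rfl
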